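-- pv_equiv track=rewrite | github.com/joshuathompson/advent_of_code_2017 | 6/part_one.py | spread_blocks
-- ===== SOURCE A (Python) =====
-- def spread_blocks(banks):
--     current_largest_index = banks.index(max(banks))
--     blocks_at_index = banks[current_largest_index]
--     banks[current_largest_index] = 0
--     spread_index = current_largest_index + 1 if current_largest_index != len(banks) - 1 else 0
--
--     for _ in range(blocks_at_index):
--         banks[spread_index] = banks[spread_index] + 1
--         spread_index = spread_index + 1 if spread_index != len(banks) - 1 else 0
--
--     return banks
-- ===== SOURCE B (Python) =====
-- def spread_blocks(banks):
--     n = len(banks)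
--     blocks = max(banks)
--     i = banks.index(blocks)
--     banks[i] = 0
--     if blocks > 0:
--         q, r = divmod(blocks, n)
--         for j in range(n):
--             banks[j] += q + (1 if (j - i - 1) % n < r else 0)
--     return banks
-- ===== Notes on version B (the rewrite author's own statement) =====
-- stated objective: alternative
-- what changed: B replaces A's one-block-at-a-time round-robin distribution loop (one iteration per block) by a divmod closed form: every bank gains blocks//n and the first blocks%n banks after the emptied one gain one extra, in a single pass over the banks.
-- outside the precondition, e.g. on spread_blocks([]): A raises ValueError, B raises ValueError
import Mathlib
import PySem

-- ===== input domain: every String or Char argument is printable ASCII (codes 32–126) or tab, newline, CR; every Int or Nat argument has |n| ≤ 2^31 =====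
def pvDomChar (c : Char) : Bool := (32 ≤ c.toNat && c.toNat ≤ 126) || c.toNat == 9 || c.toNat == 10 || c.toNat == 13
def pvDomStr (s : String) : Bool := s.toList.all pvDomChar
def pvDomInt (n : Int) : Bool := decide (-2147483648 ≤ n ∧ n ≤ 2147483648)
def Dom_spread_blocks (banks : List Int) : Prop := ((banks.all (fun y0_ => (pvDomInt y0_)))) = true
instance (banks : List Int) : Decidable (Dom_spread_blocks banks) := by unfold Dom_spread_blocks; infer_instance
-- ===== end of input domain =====

-- B replaces A's one-block-at-a-time round-robin loop by a divmod closed form: each bank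
-- gets blocks//n, and the first blocks%n banks after the emptied one get one extra.
-- Note: both Pythons mutate `banks` in place identically; the equivalence proved here is about the return value.

-- ===== PORT A =====
def spread_blocks (banks : List Int) : List Int :=
  match PySem.List.max? banks (fun y => y) with
  | none => []          -- max([]) raises ValueError; excluded by Pre_
  | some m =>
    match PySem.List.index? banks m with
    | none => []        -- unreachable: the max is a member
    | some i =>
      let n := banks.length
      let blocks := PySem.List.pyGetD banks (i : Int) 0
      let banks1 := PySem.List.pySetD banks (i : Int) 0
      let s0 := if i ≠ n - 1 then i + 1 else 0
      let st := (List.range blocks.toNat).foldl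
        (fun (st : List Int × Nat) _ =>
          (PySem.List.pySetD st.1 (st.2 : Int) (PySem.List.pyGetD st.1 (st.2 : Int) 0 + 1),
           if st.2 ≠ n - 1 then st.2 + 1 else 0))
        (banks1, s0)
      st.1

-- ===== PORT B =====
def spread_blocks_alt (banks : List Int) : List Int :=
  match PySem.List.max? banks (fun y => y) with
  | none => []          -- max([]) raises ValueError; excluded by Pre_
  | some blocks =>
    match PySem.List.index? banks blocks with
    | none => []        -- unreachable: the max is a member
    | some i =>
      let n := banks.length
      let banks1 := PySem.List.pySetD banks (i : Int) 0
      if blocks > 0 then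
        let q := PySem.Int.floordiv blocks (n : Int)
        let r := PySem.Int.mod blocks (n : Int)
        (List.range n).foldl
          (fun (bs : List Int) (j : Nat) => PySem.List.pySetD bs (j : Int)
            (PySem.List.pyGetD bs (j : Int) 0 + q +
             (if PySem.Int.mod ((j : Int) - (i : Int) - 1) (n : Int) < r then 1 else 0)))
          banks1
      else banks1

-- ===== PRECONDITION & SPEC =====
-- Pre_ excludes only the empty list, on which Python's max([]) raises ValueError in both A and B.
def Pre_spread_blocks (banks : List Int) : Prop := banks ≠ []
instance (banks : List Int) : Decidable (Pre_spread_blocks banks) := by unfold Pre_spread_blocks; infer_instance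
def pvWitness_spread_blocks : List Int := [0, 2, 7, 0]

def Spec_spread_blocks (banks : List Int) (out : List Int) : Prop := out = spread_blocks_alt banks
instance (banks : List Int) (out : List Int) : Decidable (Spec_spread_blocks banks out) := by unfold Spec_spread_blocks; infer_instance

-- ===== CLAIM (what is proved, stated in full; the proofs are below) =====
def Claim_equal_spread_blocks : Prop := ∀ (banks : List Int), Dom_spread_blocks banks → Pre_spread_blocks banks → Spec_spread_blocks banks (spread_blocks banks)

-- ===== LEMMAS AND PROOFS =====

def stepA (n : Nat) (st : List Int × Nat) : List Int × Nat :=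
  (st.1.set st.2 (st.1.getD st.2 0 + 1), if st.2 ≠ n - 1 then st.2 + 1 else 0)

def loopA (n k : Nat) (st : List Int × Nat) : List Int × Nat :=
  (List.range k).foldl (fun st _ => stepA n st) st

lemma loopA_succ (n k : Nat) (st : List Int × Nat) :
    loopA n (k + 1) st = stepA n (loopA n k st) := by
  simp [loopA, List.range_succ]

lemma foldA_eq_loopA (n k : Nat) (st : List Int × Nat) :
    (List.range k).foldl
      (fun (st : List Int × Nat) _ =>
        (PySem.List.pySetD st.1 (st.2 : Int) (PySem.List.pyGetD st.1 (st.2 : Int) 0 + 1),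
         if st.2 ≠ n - 1 then st.2 + 1 else 0)) st = loopA n k st := by
  unfold loopA
  congr 1
  funext st _
  simp only [stepA, PySem.List.pySetD_natCast, PySem.List.pyGetD_natCast]

lemma succIdx (n x : Nat) (hx : x < n) :
    (if x ≠ n - 1 then x + 1 else 0) = (x + 1) % n := by
  by_cases h : x = n - 1
  · rw [if_neg (not_ne_iff.mpr h), show x + 1 = n by omega, Nat.mod_self]
  · have : x + 1 < n := by omega
    simp [h, Nat.mod_eq_of_lt this]

lemma loopA_char (n : Nat) (hn : 0 < n) (k : Nat) (l : List Int) (hl : l.length = n)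
    (s : Nat) (hs : s < n) :
    (loopA n k (l, s)).1.length = n ∧ (loopA n k (l, s)).2 = (s + k) % n ∧
    ∀ j, (loopA n k (l, s)).1[j]? =
      (l[j]?).map (fun v => v + (((List.range k).countP (fun t => (s + t) % n == j) : Nat) : Int)) := by
  induction k with
  | zero =>
    have h0 : loopA n 0 (l, s) = (l, s) := rfl
    rw [h0]
    refine ⟨hl, (Nat.mod_eq_of_lt hs).symm, ?_⟩
    intro j
    cases l[j]? <;> simp
  | succ k ih =>
    obtain ⟨hlen, hsnd, hget⟩ := ih
    have hp : (loopA n k (l, s)).2 < n := hsnd ▸ Nat.mod_lt _ hn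
    have hcnt : ∀ j, (List.range (k + 1)).countP (fun t => (s + t) % n == j)
        = (List.range k).countP (fun t => (s + t) % n == j)
          + (if (s + k) % n = j then 1 else 0) := by
      intro j
      rw [List.range_succ, List.countP_append, List.countP_cons, List.countP_nil]
      by_cases h : (s + k) % n = j
      · simp [h]
      · simp [h]
    refine ⟨?_, ?_, ?_⟩
    · rw [loopA_succ]; simpa [stepA] using hlen
    · rw [loopA_succ]
      show (if (loopA n k (l, s)).2 ≠ n - 1 then (loopA n k (l, s)).2 + 1 else 0) = _
      rw [succIdx n _ hp, hsnd, Nat.mod_add_mod, Nat.add_assoc]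
    · intro j
      rw [loopA_succ]
      have hset : (stepA n (loopA n k (l, s))).1
          = (loopA n k (l, s)).1.set (loopA n k (l, s)).2
              ((loopA n k (l, s)).1.getD (loopA n k (l, s)).2 0 + 1) := rfl
      rw [hset, List.getElem?_set]
      by_cases hpj : (loopA n k (l, s)).2 = j
      · have hjn : j < n := hpj ▸ hp
        have hjl : j < l.length := by rw [hl]; exact hjn
        have hlj : l[j]? = some l[j] := List.getElem?_eq_getElem hjl
        have hsk : (s + k) % n = j := by rw [← hsnd]; exact hpj
        have hgd : (loopA n k (l, s)).1.getD j 0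
            = l[j] + (((List.range k).countP (fun t => (s + t) % n == j) : Nat) : Int) := by
          rw [List.getD_eq_getElem?_getD, hget j, hlj]
          rfl
        rw [if_pos hpj, if_pos (show (loopA n k (l, s)).2 < (loopA n k (l, s)).1.length by
              rw [hlen]; exact hp), hpj, hgd, hcnt j, hlj, if_pos hsk]
        simp only [Option.map_some]
        push_cast
        ring_nf
      · rw [if_neg hpj, hget j, hcnt j,
          if_neg (show ¬ (s + k) % n = j by rw [← hsnd]; exact hpj)]
        simp

lemma cnt_closed (n : Nat) (hn : 0 < n) (s j : Nat) (hs : s < n) (hj : j < n) (k : Nat) :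
    (List.range k).countP (fun t => (s + t) % n == j)
      = k / n + if (j + n - s) % n < k % n then 1 else 0 := by
  have hiff : ∀ t, ((s + t) % n == j) = decide (t ≡ (j + n - s) [MOD n]) := by
    intro t
    have key : (j + n - s) + s ≡ j [MOD n] := by
      have h1 : (j + n - s) + s = j + n := by omega
      rw [h1]
      show (j + n) % n = j % n
      exact Nat.add_mod_right j n
    by_cases h : (s + t) % n = j
    · have h2 : s + t ≡ j [MOD n] := by
        show (s + t) % n = j % n
        rw [h, Nat.mod_eq_of_lt hj]
      have h3 : t + s ≡ (j + n - s) + s [MOD n] := by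
        calc t + s ≡ j [MOD n] := by rwa [Nat.add_comm]
        _ ≡ (j + n - s) + s [MOD n] := key.symm
      have h4 : t ≡ (j + n - s) [MOD n] := Nat.ModEq.add_right_cancel' s h3
      simp [h, h4]
    · have h4 : ¬ t ≡ (j + n - s) [MOD n] := by
        intro h4
        apply h
        have h5 : s + t ≡ s + (j + n - s) [MOD n] := h4.add_left s
        have h6 : s + (j + n - s) = j + n := by omega
        rw [h6] at h5
        have h7 : (s + t) % n = (j + n) % n := h5
        rw [h7, Nat.add_mod_right, Nat.mod_eq_of_lt hj]
      simp [h, h4]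
  rw [List.countP_congr (fun t _ => by rw [hiff t])]
  exact Nat.count_modEq_card k hn (j + n - s)


def loopB (g : Nat → Int → Int) (k : Nat) (l : List Int) : List Int :=
  (List.range k).foldl (fun bs j => bs.set j (g j (bs.getD j 0))) l

lemma loopB_succ (g : Nat → Int → Int) (k : Nat) (l : List Int) :
    loopB g (k + 1) l = (loopB g k l).set k (g k ((loopB g k l).getD k 0)) := by
  simp [loopB, List.range_succ]

lemma foldB_eq_loopB (k : Nat) (q r : Int) (i : Nat) (nI : Int) (l : List Int) :
    (List.range k).foldl
      (fun (bs : List Int) (j : Nat) => PySem.List.pySetD bs (j : Int)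
        (PySem.List.pyGetD bs (j : Int) 0 + q +
         (if PySem.Int.mod ((j : Int) - (i : Int) - 1) nI < r then 1 else 0))) l
    = loopB (fun j v => v + q +
        (if PySem.Int.mod ((j : Int) - (i : Int) - 1) nI < r then 1 else 0)) k l := by
  have hfun : (fun (bs : List Int) (j : Nat) => PySem.List.pySetD bs (j : Int)
        (PySem.List.pyGetD bs (j : Int) 0 + q +
         (if PySem.Int.mod ((j : Int) - (i : Int) - 1) nI < r then 1 else 0)))
      = fun (bs : List Int) (j : Nat) => bs.set j
          ((fun (j : Nat) (v : Int) => v + q +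
            (if PySem.Int.mod ((j : Int) - (i : Int) - 1) nI < r then 1 else 0)) j (bs.getD j 0)) := by
    funext bs j
    simp only [PySem.List.pySetD_natCast, PySem.List.pyGetD_natCast]
  unfold loopB
  rw [hfun]

lemma loopB_char (g : Nat → Int → Int) (k : Nat) (l : List Int) (hk : k ≤ l.length) :
    (loopB g k l).length = l.length ∧
    ∀ j, (loopB g k l)[j]? = if j < k then (l[j]?).map (g j) else l[j]? := by
  induction k with
  | zero =>
    refine ⟨rfl, ?_⟩
    intro j
    simp [loopB]
  | succ k ih =>
    obtain ⟨hlen, hget⟩ := ih (by omega)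
    have hkl : k < l.length := by omega
    refine ⟨?_, ?_⟩
    · rw [loopB_succ]; simpa using hlen
    · intro j
      rw [loopB_succ, List.getElem?_set]
      by_cases hjk : k = j
      · subst hjk
        rw [if_pos rfl, if_pos (by rw [hlen]; exact hkl), if_pos (by omega)]
        have hgd : (loopB g k l).getD k 0 = l[k] := by
          rw [List.getD_eq_getElem?_getD, hget k, if_neg (by omega),
            List.getElem?_eq_getElem hkl]
          rfl
        rw [hgd, List.getElem?_eq_getElem hkl]
        rfl
      · rw [if_neg hjk, hget j]
        by_cases hj : j < k
        · rw [if_pos hj, if_pos (by omega)]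
        · rw [if_neg hj, if_neg (by omega)]

lemma main_eq (banks : List Int) (h : banks ≠ []) :
    spread_blocks banks = spread_blocks_alt banks := by
  obtain ⟨m, hm⟩ : ∃ m, PySem.List.max? banks (fun y => y) = some m := by
    cases hmx : PySem.List.max? banks (fun y => y) with
    | none => exact absurd ((PySem.List.max?_eq_none_iff _ _).1 hmx) h
    | some m => exact ⟨m, rfl⟩
  have hmem : m ∈ banks := PySem.List.max?_mem hm
  obtain ⟨i, hi⟩ : ∃ i, PySem.List.index? banks m = some i := by
    cases hix : PySem.List.index? banks m with
    | none =>
      have hsome := (PySem.List.index?_isSome_iff banks m).2 hmem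
      rw [hix] at hsome
      exact absurd hsome (by simp)
    | some i => exact ⟨i, rfl⟩
  obtain ⟨hilt, hbi, -⟩ := PySem.List.getElem_of_index?_eq_some hi
  have hn0 : 0 < banks.length := List.length_pos_iff.mpr h
  have hblocks : PySem.List.pyGetD banks (i : Int) 0 = m := by
    simp [List.getD_eq_getElem?_getD, List.getElem?_eq_getElem hilt, hbi]
  simp only [spread_blocks, spread_blocks_alt, hm, hi, hblocks]
  rw [PySem.List.pySetD_natCast banks i 0]
  set n := banks.length with hn
  set l := banks.set i 0 with hldef
  have hll : l.length = n := by rw [hldef, List.length_set]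
  by_cases hpos : m > 0
  · -- positive number of blocks
    rw [if_pos hpos]
    set s0 := if i ≠ n - 1 then i + 1 else 0 with hs0def
    have hs0 : s0 < n := by rw [hs0def]; split <;> omega
    set k := m.toNat with hk
    have hkm : (k : Int) = m := Int.toNat_of_nonneg (le_of_lt hpos)
    rw [foldA_eq_loopA, foldB_eq_loopB]
    obtain ⟨hAlen, -, hAget⟩ := loopA_char n hn0 k l hll s0 hs0
    obtain ⟨hBlen, hBget⟩ := loopB_char _ n l (le_of_eq hll.symm)
    have hq : PySem.Int.floordiv m (n : Int) = ((k / n : Nat) : Int) := by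
      rw [← hkm, PySem.Int.floordiv_natCast]
    have hr : PySem.Int.mod m (n : Int) = ((k % n : Nat) : Int) := by
      rw [← hkm, PySem.Int.mod_natCast]
    apply List.ext_getElem?
    intro j
    rw [hAget j, hBget j]
    by_cases hj : j < n
    · have hjl : j < l.length := by omega
      rw [if_pos hj, List.getElem?_eq_getElem hjl]
      simp only [Option.map_some, Option.some.injEq]
      have hmodeq : PySem.Int.mod ((j : Int) - (i : Int) - 1) (n : Int)
          = (((j + n - s0) % n : Nat) : Int) := by
        rw [PySem.Int.mod_eq_emod_of_pos (by exact_mod_cast hn0)]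
        rw [Int.natCast_mod]
        by_cases hin : i ≠ n - 1
        · have h1 : ((j + n - s0 : Nat) : Int) = (j : Int) - (i : Int) - 1 + (n : Int) := by
            rw [hs0def, if_pos hin]
            omega
          rw [h1, Int.add_emod_right]
        · have h1 : ((j + n - s0 : Nat) : Int) = (j : Int) + (n : Int) := by
            rw [hs0def, if_neg hin]
            omega
          have h2 : (j : Int) - (i : Int) - 1 = (j : Int) - (n : Int) := by
            have hieq : i = n - 1 := by omega
            omega
          rw [h1, h2, Int.add_emod_right, Int.sub_emod_right]
      rw [cnt_closed n hn0 s0 j hs0 hj k, hq, hr, hmodeq]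
      by_cases hc : (j + n - s0) % n < k % n
      · rw [if_pos hc, if_pos (by exact_mod_cast hc)]
        push_cast
        ring
      · rw [if_neg hc, if_neg (by exact_mod_cast hc)]
        push_cast
        ring
    · rw [if_neg hj, List.getElem?_eq_none (by omega)]
      simp
  · -- m ≤ 0 : the loop body runs zero times in A, and B takes the else branch
    rw [if_neg hpos]
    have hk0 : m.toNat = 0 := Int.toNat_of_nonpos (le_of_not_gt hpos)
    rw [hk0]
    rfl

-- ===== VERDICT (by name: the statement is the Claim_ definition above) =====
theorem spread_blocks_spec : Claim_equal_spread_blocks := by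
  intro banks _ hpre
  unfold Spec_spread_blocks
  exact main_eq banks hpre
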